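-- pv_equiv track=rewrite | github.com/4luqard/polymer-performance-prediction | extract_features.py | heavy_atom_amount
-- ===== SOURCE A (Python) =====
-- def heavy_atom_amount(features: dict) -> int:
--     """
--     Calculate the total number of heavy atoms (all atoms except hydrogen).
--
--     Args:
--         features: Dictionary with atom counts where keys are atom symbols
--
--     Returns:
--         Total count of all heavy atoms
--     """
--     # Define the available elements in the dataset
--     elements = ['B', 'C', 'N', 'O', 'F', 'Na', 'Si', 'P', 'S',
--                 'Cl', 'Ca', 'Ge', 'Se', 'Br', 'Cd', 'Sn', 'Te']
--
--     total = 0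
--     for key, value in features.items():
--         # Check if the key is an element
--         if key in elements:
--             total += value
--
--     return total
-- ===== SOURCE B (Python) =====
-- def heavy_atom_amount(features: dict) -> int:
--     """
--     Calculate the total number of heavy atoms (all atoms except hydrogen).
--
--     Args:
--         features: Dictionary with atom counts where keys are atom symbols
--
--     Returns:
--         Total count of all heavy atoms
--     """
--     elements = ['B', 'C', 'N', 'O', 'F', 'Na', 'Si', 'P', 'S',
--                 'Cl', 'Ca', 'Ge', 'Se', 'Br', 'Cd', 'Sn', 'Te']
--     return sum(features.get(e, 0) for e in elements)
-- ===== Notes on version B (the rewrite author's own statement) =====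
-- stated objective: alternative
-- what changed: B inverts the traversal: instead of scanning every dict entry and testing membership in the element list, it iterates over the fixed 17-element list and sums features.get(e, 0); absent elements contribute 0 and unique dict keys make the totals identical.
import Mathlib
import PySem

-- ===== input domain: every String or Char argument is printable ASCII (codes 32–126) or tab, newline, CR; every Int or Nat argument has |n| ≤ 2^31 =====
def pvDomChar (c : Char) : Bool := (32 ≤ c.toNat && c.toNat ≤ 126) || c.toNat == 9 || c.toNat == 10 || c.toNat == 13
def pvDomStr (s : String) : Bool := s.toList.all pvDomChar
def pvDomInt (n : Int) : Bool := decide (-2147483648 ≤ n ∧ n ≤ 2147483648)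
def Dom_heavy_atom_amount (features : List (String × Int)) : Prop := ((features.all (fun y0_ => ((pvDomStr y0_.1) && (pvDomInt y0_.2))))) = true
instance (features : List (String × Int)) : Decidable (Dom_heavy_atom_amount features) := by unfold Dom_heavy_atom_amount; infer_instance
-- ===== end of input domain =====

-- B iterates over the fixed element list and sums first-match lookups instead of
-- scanning every dict entry and filtering by membership (alternative decomposition).
-- ===== PORT A =====
def pvElements : List String :=
  ["B", "C", "N", "O", "F", "Na", "Si", "P", "S",
   "Cl", "Ca", "Ge", "Se", "Br", "Cd", "Sn", "Te"]

def heavy_atom_amount (features : List (String × Int)) : Int :=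
  features.foldl (fun total kv => if kv.1 ∈ pvElements then total + kv.2 else total) 0

-- ===== PORT B =====
-- features.get(e, 0): first-match lookup in the association list, 0 if absent
def pvGet0 (features : List (String × Int)) (e : String) : Int :=
  match features with
  | [] => 0
  | (k, v) :: rest => if k = e then v else pvGet0 rest e

def heavy_atom_amount_alt (features : List (String × Int)) : Int :=
  pvElements.foldl (fun acc e => acc + pvGet0 features e) 0

-- ===== PRECONDITION & SPEC =====
-- features stands for a Python dict, whose keys are unique; Pre_ states exactly
-- that (it excludes no input that arises from an actual Python dict).
def Pre_heavy_atom_amount (features : List (String × Int)) : Prop :=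
  (features.map Prod.fst).Nodup
instance (features : List (String × Int)) : Decidable (Pre_heavy_atom_amount features) := by
  unfold Pre_heavy_atom_amount; infer_instance
def pvWitness_heavy_atom_amount : (List (String × Int)) := [("C", 3), ("H", 8), ("O", 1)]
def Spec_heavy_atom_amount (features : List (String × Int)) (out : Int) : Prop := out = heavy_atom_amount_alt features
instance (features : List (String × Int)) (out : Int) : Decidable (Spec_heavy_atom_amount features out) := by unfold Spec_heavy_atom_amount; infer_instance

-- ===== CLAIM (what is proved, stated in full; the proofs are below) =====
def Claim_equal_heavy_atom_amount : Prop := ∀ (features : List (String × Int)), Dom_heavy_atom_amount features → Pre_heavy_atom_amount features → Spec_heavy_atom_amount features (heavy_atom_amount features)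

-- ===== LEMMAS AND PROOFS =====

-- A's fold is the sum of the values of the entries whose key is an element
theorem pvA_sum (feats : List (String × Int)) (c : Int) :
    feats.foldl (fun total kv => if kv.1 ∈ pvElements then total + kv.2 else total) c
      = c + (((feats.filter (fun kv => decide (kv.1 ∈ pvElements))).map Prod.snd).sum) := by
  induction feats generalizing c with
  | nil => simp
  | cons kv rest ih =>
      by_cases h : kv.1 ∈ pvElements <;>
        simp [List.foldl_cons, h, ih] <;> try ring

-- B's fold is the sum of the lookups over the element list
theorem pvB_sum (feats : List (String × Int)) (L : List String) (c : Int) :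
    L.foldl (fun acc e => acc + pvGet0 feats e) c
      = c + ((L.map (fun e => pvGet0 feats e)).sum) := by
  induction L generalizing c with
  | nil => simp
  | cons e rest ih => simp [List.foldl_cons, ih]; ring

-- summing a pointwise-modified function over a duplicate-free list
theorem pvSum_update (L : List String) (k : String) (v : Int) (g : String → Int)
    (hnd : L.Nodup) (hk : g k = 0) :
    (L.map (fun e => if k = e then v else g e)).sum
      = (if k ∈ L then v else 0) + (L.map g).sum := by
  induction L with
  | nil => simp
  | cons e rest ih =>
      rcases List.nodup_cons.mp hnd with ⟨he, hrest⟩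
      by_cases hke : k = e
      · subst hke
        have : k ∉ rest := he
        have hmap : rest.map (fun e => if k = e then v else g e) = rest.map g := by
          apply List.map_congr_left
          intro x hx
          have : k ≠ x := by rintro rfl; exact this hx
          simp [this]
        simp [hmap, hk]
      · simp [hke, ih hrest, List.mem_cons]
        by_cases hkr : k ∈ rest <;> simp [hkr] <;> ring

-- a key absent from the association list looks up to the default 0
theorem pvGet0_not_mem (feats : List (String × Int)) (k : String)
    (h : k ∉ feats.map Prod.fst) : pvGet0 feats k = 0 := by
  induction feats with
  | nil => rfl
  | cons p t iht =>
      have h2 : p.1 ≠ k := by intro he; exact h (by simp [he])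
      simp only [List.map_cons, List.mem_cons] at h
      push_neg at h
      simp [pvGet0, h2, iht h.2]

-- the key step: with unique keys, filtering entries equals summing lookups
theorem pvMain (feats : List (String × Int)) (hnd : (feats.map Prod.fst).Nodup) :
    (((feats.filter (fun kv => decide (kv.1 ∈ pvElements))).map Prod.snd).sum)
      = ((pvElements.map (fun e => pvGet0 feats e)).sum) := by
  induction feats with
  | nil =>
      have : ∀ e, pvGet0 [] e = 0 := fun _ => rfl
      simp [pvGet0]
  | cons kv rest ih =>
      rcases List.nodup_cons.mp hnd with ⟨hk, hrest⟩
      have hk0 : pvGet0 rest kv.1 = 0 := pvGet0_not_mem rest kv.1 hk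
      have hnodE : pvElements.Nodup := by decide
      have hget : ∀ e, pvGet0 (kv :: rest) e = if kv.1 = e then kv.2 else pvGet0 rest e := by
        intro e; rfl
      have hupd :
          (pvElements.map (fun e => pvGet0 (kv :: rest) e)).sum
            = (if kv.1 ∈ pvElements then kv.2 else 0)
                + (pvElements.map (fun e => pvGet0 rest e)).sum := by
        calc (pvElements.map (fun e => pvGet0 (kv :: rest) e)).sum
            = (pvElements.map (fun e => if kv.1 = e then kv.2 else pvGet0 rest e)).sum := by
              simp only [hget]
          _ = _ := pvSum_update pvElements kv.1 kv.2 (fun e => pvGet0 rest e) hnodE hk0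
      rw [hupd, ← ih hrest]
      by_cases h : kv.1 ∈ pvElements <;> simp [h]

-- ===== VERDICT (by name: the statement is the Claim_ definition above) =====
theorem heavy_atom_amount_spec : Claim_equal_heavy_atom_amount := by
  intro features _ hpre
  unfold Spec_heavy_atom_amount heavy_atom_amount heavy_atom_amount_alt
  rw [pvA_sum, pvB_sum, pvMain features hpre]
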